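-- pv_equiv track=rewrite | github.com/Bumja12/programmers | 프로그래머스/2/138476. 귤 고르기/귤 고르기.py | solution
-- ===== SOURCE A (Python) =====
-- from collections import defaultdict
--
-- def solution(k, tangerine):
--     # Step 1: Create a frequency dictionary
--     freq = defaultdict(int)
--     for t in tangerine:
--         freq[t] += 1
--
--     # Step 2: Create a list to store frequencies, assuming the size range is known
--     max_freq = max(freq.values())
--     count_buckets = [0] * (max_freq + 1)
--
--     for f in freq.values():
--         count_buckets[f] += 1
--
--     # Step 3: Iterate over the buckets from high to low frequency
--     s = 0
--     types = 0
--
--     for f in range(max_freq, 0, -1):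
--         if count_buckets[f] > 0:
--             num_tangerines = f * count_buckets[f]
--             if s + num_tangerines >= k:
--                 # Calculate how many types are needed
--                 needed = (k - s + f - 1) // f  # ceiling division
--                 return types + needed
--             s += num_tangerines
--             types += count_buckets[f]
--
--     return types + 2
-- ===== SOURCE B (Python) =====
-- from collections import Counter
--
--
-- def solution(k, tangerine):
--     """Fewest tangerine kinds whose combined count reaches k; if even the
--     whole crop falls short, the kind count offset by 2 as an out-of-range
--     marker (k <= len(tangerine) is guaranteed by the problem statement)."""
--     freqs = sorted(Counter(tangerine).values(), reverse=True)
--     s = 0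
--     for i, f in enumerate(freqs, 1):
--         s += f
--         if s >= k:
--             return i
--     return len(freqs) + 2
-- ===== Notes on version B (the rewrite author's own statement) =====
-- stated objective: simpler
-- what changed: A's counting-sort buckets plus ceiling-division block arithmetic are replaced by sorting the Counter's frequency list descending and greedily scanning it one type at a time (prefix sums), returning the 1-based index once k is reached; Pre_ excludes the empty list (A's max() raises ValueError) and k <= 0, where A's ceiling arithmetic returns 0 or a negative 'number of types'.
-- outside the precondition, e.g. on solution(0, [1]): A returns 0, B returns 1; on solution(-3, [2, 2, 2, 1]): A returns -1, B returns 1; on solution(1, []): A raises ValueError, B returns 2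
import Mathlib
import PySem

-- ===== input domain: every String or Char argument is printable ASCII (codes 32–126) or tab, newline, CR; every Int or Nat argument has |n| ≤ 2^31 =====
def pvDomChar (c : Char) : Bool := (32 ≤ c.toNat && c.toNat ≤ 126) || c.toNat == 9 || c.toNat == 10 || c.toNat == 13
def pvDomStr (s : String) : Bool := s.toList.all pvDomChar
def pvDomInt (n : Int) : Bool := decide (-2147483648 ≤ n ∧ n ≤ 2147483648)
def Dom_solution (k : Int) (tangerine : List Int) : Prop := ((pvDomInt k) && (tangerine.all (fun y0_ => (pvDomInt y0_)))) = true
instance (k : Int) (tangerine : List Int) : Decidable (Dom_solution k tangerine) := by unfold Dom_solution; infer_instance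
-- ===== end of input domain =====

-- B replaces A's counting-sort buckets + ceiling division by a descending sort of the
-- frequency list and a greedy per-type prefix-sum scan (objective: simpler).

-- ===== PORT A =====
-- the 'for f in range(max_freq, 0, -1)' loop with its early return
def solALoop (k : Int) (buckets : List Int) : List Int → Int → Int → Int
  | [], _s, types => types + 2
  | f :: fs, s, types =>
      let c := buckets.getD f.toNat 0      -- count_buckets[f]; exact: 1 ≤ f ≤ max_freq is in range
      if 0 < c then
        let num := f * c
        if k ≤ s + num then types + PySem.Int.floordiv (k - s + f - 1) f
        else solALoop k buckets fs (s + num) (types + c)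
      else solALoop k buckets fs s types

def solution (k : Int) (tangerine : List Int) : Int :=
  -- freq = defaultdict(int); for t in tangerine: freq[t] += 1
  let freq := tangerine.foldl (fun d t => PySem.Dict.modify d t 0 (· + 1)) PySem.Dict.empty
  match PySem.List.max? (PySem.Dict.values freq) (fun v => v) with
  | none => 0    -- max() of an empty sequence raises ValueError: excluded by Pre_solution
  | some maxFreq =>
      let buckets0 := List.replicate (maxFreq + 1).toNat (0 : Int)
      -- for f in freq.values(): count_buckets[f] += 1   (exact: 1 ≤ f ≤ max_freq is in range)
      let buckets := (PySem.Dict.values freq).foldl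
        (fun bs f => bs.set f.toNat (bs.getD f.toNat 0 + 1)) buckets0
      solALoop k buckets (PySem.List.pyRange maxFreq 0 (-1)) 0 0

-- ===== PORT B =====
-- the 'for i, f in enumerate(freqs, 1)' loop with its early return
def solBLoop (k n : Int) : List Int → Int → Int → Int
  | [], _i, _s => n + 2
  | f :: fs, i, s => if k ≤ s + f then i else solBLoop k n fs (i + 1) (s + f)

def solution_alt (k : Int) (tangerine : List Int) : Int :=
  let freqs := PySem.List.sorted (PySem.Dict.values (PySem.Dict.counter tangerine)) (fun v => v) true
  solBLoop k (PySem.List.len freqs) freqs 1 0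

-- ===== PRECONDITION & SPEC =====
-- Pre_ restricts to the problem's stated domain (1 ≤ k) and excludes the empty list, on
-- which A's max() raises ValueError; for k ≤ 0 A's ceiling arithmetic returns 0 or a
-- negative 'number of types', values outside the task's natural domain.
def Pre_solution (k : Int) (tangerine : List Int) : Prop := tangerine ≠ [] ∧ 1 ≤ k
instance (k : Int) (tangerine : List Int) : Decidable (Pre_solution k tangerine) := by
  unfold Pre_solution; infer_instance

def pvWitness_solution : Int × List Int := (1, [1])

def Spec_solution (k : Int) (tangerine : List Int) (out : Int) : Prop := out = solution_alt k tangerine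
instance (k : Int) (tangerine : List Int) (out : Int) : Decidable (Spec_solution k tangerine out) := by
  unfold Spec_solution; infer_instance

-- ===== CLAIM (what is proved, stated in full; the proofs are below) =====
def Claim_equal_solution : Prop := ∀ (k : Int) (tangerine : List Int), Dom_solution k tangerine → Pre_solution k tangerine → Spec_solution k tangerine (solution k tangerine)

-- ===== LEMMAS AND PROOFS =====

-- the values of Counter(tangerine) are the multiplicities of the distinct elements
theorem counter_values (tangerine : List Int) :
    PySem.Dict.values (PySem.Dict.counter tangerine)
      = (PySem.Set.ofList tangerine).map (fun x => (tangerine.count x : Int)) := by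
  rw [PySem.Dict.values_eq_map_keys _ (PySem.Dict.nodup_keys_counter tangerine) 0,
      PySem.Dict.keys_counter]
  exact List.map_congr_left (fun x _ => PySem.Dict.getD_counter tangerine x)

theorem counter_values_pos (tangerine : List Int) :
    ∀ v ∈ PySem.Dict.values (PySem.Dict.counter tangerine), 1 ≤ v := by
  rw [counter_values]
  intro v hv
  obtain ⟨x, hx, rfl⟩ := List.mem_map.mp hv
  have : x ∈ tangerine := (PySem.Set.mem_ofList _ _).mp hx
  have := List.count_pos_iff.mpr this
  omega

theorem counter_values_ne_nil (tangerine : List Int) (h : tangerine ≠ []) :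
    PySem.Dict.values (PySem.Dict.counter tangerine) ≠ [] := by
  rw [counter_values]
  simp only [ne_eq, List.map_eq_nil_iff]
  intro hnil
  obtain ⟨t, ts, rfl⟩ := List.exists_cons_of_ne_nil h
  have : t ∈ PySem.Set.ofList (t :: ts) := (PySem.Set.mem_ofList _ _).mpr (by simp)
  rw [hnil] at this; exact absurd this (by simp)

-- range(j+1, 0, -1) = (j+1) :: range(j, 0, -1)
theorem pyRange_down_succ (j : Nat) :
    PySem.List.pyRange ((j : Int) + 1) 0 (-1) = ((j : Int) + 1) :: PySem.List.pyRange (j : Int) 0 (-1) := by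
  simp only [PySem.List.pyRange]
  norm_num
  rw [show (if 0 < j then j else 0) = j by split <;> omega, List.range_succ_eq_map]
  simp only [List.map_cons, List.map_map]
  congr 1
  exact List.map_congr_left (fun k _ => by simp [Function.comp])

-- the bucket-filling fold preserves length and counts occurrences
theorem bucket_fold_length (l : List Int) (bs : List Int) :
    (l.foldl (fun bs f => bs.set f.toNat (bs.getD f.toNat 0 + 1)) bs).length = bs.length := by
  induction l generalizing bs with
  | nil => rfl
  | cons v l ih => rw [List.foldl_cons, ih, List.length_set]

theorem bucket_fold_getD (l : List Int) (bs : List Int) (f : Int) (hf : 0 ≤ f)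
    (hl : ∀ v ∈ l, 0 ≤ v ∧ v.toNat < bs.length) :
    (l.foldl (fun bs f => bs.set f.toNat (bs.getD f.toNat 0 + 1)) bs).getD f.toNat 0
      = bs.getD f.toNat 0 + l.count f := by
  induction l generalizing bs with
  | nil => simp
  | cons v l ih =>
    obtain ⟨hv0, hvlen⟩ := hl v (by simp)
    rw [List.foldl_cons, ih _ (fun w hw => by
      have := hl w (by simp [hw]); simpa [List.length_set] using this)]
    rw [List.count_cons]
    by_cases hvf : v = f
    · subst hvf
      rw [List.getD_eq_getElem?_getD, List.getElem?_set_self (by omega), List.getD_eq_getElem?_getD]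
      simp [List.getElem?_eq_getElem hvlen]
      ring
    · have : v.toNat ≠ f.toNat := fun h => hvf (by omega)
      rw [List.getD_eq_getElem?_getD, List.getElem?_set_ne this, ← List.getD_eq_getElem?_getD]
      simp [hvf]

-- descending blocks [j,…,j, j-1,…,… ,1,…,1] with the right multiplicities
def blocks (vals : List Int) : Nat → List Int
  | 0 => []
  | j + 1 => List.replicate (vals.count ((j : Int) + 1)) ((j : Int) + 1) ++ blocks vals j

theorem count_blocks (vals : List Int) (j : Nat) (f : Int) :
    (blocks vals j).count f = if 1 ≤ f ∧ f ≤ (j : Int) then vals.count f else 0 := by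
  induction j with
  | zero => simp [blocks]; intro h1 h2; omega
  | succ j ih =>
    rw [blocks, List.count_append, ih, List.count_replicate]
    by_cases hf : f = (j : Int) + 1
    · subst hf; simp
    · simp only [beq_iff_eq]
      rw [if_neg (fun h => hf h.symm)]
      push_cast
      split_ifs <;> omega

theorem mem_blocks (vals : List Int) (j : Nat) (x : Int) (hx : x ∈ blocks vals j) :
    1 ≤ x ∧ x ≤ (j : Int) := by
  induction j with
  | zero => simp [blocks] at hx
  | succ j ih =>
    rw [blocks, List.mem_append] at hx
    rcases hx with hx | hx
    · have := List.eq_of_mem_replicate hx; push_cast; omega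
    · have := ih hx; push_cast; omega

theorem blocks_perm (vals : List Int) (m : Nat)
    (hv : ∀ v ∈ vals, 1 ≤ v ∧ v ≤ (m : Int)) : (blocks vals m).Perm vals := by
  rw [List.perm_iff_count]
  intro f
  rw [count_blocks]
  split_ifs with h
  · rfl
  · symm
    rw [List.count_eq_zero]
    intro hmem
    exact h (hv f hmem)

theorem blocks_sorted (vals : List Int) (j : Nat) :
    (blocks vals j).Pairwise (fun a b => b ≤ a) := by
  induction j with
  | zero => simp [blocks]
  | succ j ih =>
    rw [blocks, List.pairwise_append]
    refine ⟨List.pairwise_replicate.mpr (.inr le_rfl), ih, ?_⟩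
    intro a ha b hb
    have := List.eq_of_mem_replicate ha
    have := mem_blocks vals j b hb
    omega

theorem sorted_eq_blocks (vals : List Int) (m : Nat)
    (hv : ∀ v ∈ vals, 1 ≤ v ∧ v ≤ (m : Int)) :
    PySem.List.sorted vals (fun v => v) true = blocks vals m := by
  refine List.Perm.eq_of_pairwise (fun a b _ _ h1 h2 => le_antisymm h2 h1)
    (PySem.List.sorted_pairwise_rev vals (fun v => v)) (blocks_sorted vals m)
    ((PySem.List.sorted_perm vals (fun v => v) true).trans (blocks_perm vals m hv).symm)

-- B's scan returns types + ceil((k-s)/f) when the current block reaches k …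
theorem blockHit (k n f : Int) (hf : 1 ≤ f) (c : Nat) :
    ∀ (i s : Int) (rest : List Int), s < k → k ≤ s + f * c →
    solBLoop k n (List.replicate c f ++ rest) i s
      = i - 1 + PySem.Int.floordiv (k - s + f - 1) f := by
  induction c with
  | zero => intro i s rest h1 h2; simp at h2; omega
  | succ c ih =>
    intro i s rest h1 h2
    rw [List.replicate_succ, List.cons_append, solBLoop]
    by_cases hk : k ≤ s + f
    · rw [if_pos hk]
      have : PySem.Int.floordiv (k - s + f - 1) f = 1 := by
        rw [PySem.Int.floordiv_eq_iff_of_pos (by omega)]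
        omega
      omega
    · rw [if_neg hk]
      rw [ih (i + 1) (s + f) rest (by omega) (by push_cast at h2 ⊢; ring_nf; ring_nf at h2; omega)]
      have heq : PySem.Int.floordiv (k - s + f - 1) f = PySem.Int.floordiv (k - (s + f) + f - 1) f + 1 := by
        rw [PySem.Int.floordiv_eq_ediv_of_pos (by omega), PySem.Int.floordiv_eq_ediv_of_pos (by omega)]
        rw [show k - s + f - 1 = (k - (s + f) + f - 1) + 1 * f by ring]
        rw [Int.add_mul_ediv_right _ _ (by omega)]
      omega

-- … and otherwise consumes the whole block
theorem blockPass (k n f : Int) (hf : 1 ≤ f) (c : Nat) :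
    ∀ (i s : Int) (rest : List Int), s + f * c < k →
    solBLoop k n (List.replicate c f ++ rest) i s = solBLoop k n rest (i + c) (s + f * c) := by
  induction c with
  | zero => intro i s rest h; simp
  | succ c ih =>
    intro i s rest h
    rw [List.replicate_succ, List.cons_append, solBLoop]
    have hfc : 0 ≤ f * c := by positivity
    have h' : s + f + f * c < k := by push_cast at h; nlinarith [h]
    rw [if_neg (by push_cast at h; nlinarith), ih (i + 1) (s + f) rest h']
    congr 1 <;> push_cast <;> ring

-- main loop correspondence: A's bucket scan = B's scan of the block list
theorem loop_main (k : Int) (vals buckets : List Int) (n : Int)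
    (hb : ∀ f : Int, 1 ≤ f → f.toNat < buckets.length →
      buckets.getD f.toNat 0 = (vals.count f : Int)) :
    ∀ (j : Nat), j < buckets.length → ∀ (s types : Int), s < k →
    types + ((blocks vals j).length : Int) = n →
    solALoop k buckets (PySem.List.pyRange (j : Int) 0 (-1)) s types
      = solBLoop k n (blocks vals j) (types + 1) s := by
  intro j
  induction j with
  | zero =>
    intro _ s types hs hn
    have h0 : PySem.List.pyRange (0 : Int) 0 (-1) = [] := by decide
    rw [Nat.cast_zero, h0]
    simp only [blocks, List.length_nil] at hn ⊢
    rw [solALoop, solBLoop]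
    omega
  | succ j ih =>
    intro hj s types hs hn
    have hf1 : (1 : Int) ≤ (j : Int) + 1 := by omega
    have hlen : ((j : Int) + 1).toNat < buckets.length := by omega
    have hcnt := hb ((j : Int) + 1) hf1 hlen
    push_cast [pyRange_down_succ j]
    rw [solALoop]
    simp only [hcnt]
    rw [blocks] at hn ⊢
    by_cases hc : 0 < (vals.count ((j : Int) + 1) : Int)
    · rw [if_pos hc]
      by_cases hk : k ≤ s + ((j : Int) + 1) * (vals.count ((j : Int) + 1) : Int)
      · rw [if_pos hk]
        rw [blockHit k n ((j : Int) + 1) hf1 _ _ _ _ hs hk]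
        ring
      · rw [if_neg hk]
        rw [blockPass k n ((j : Int) + 1) hf1 _ _ _ _ (by omega)]
        have := ih (by omega) (s + ((j : Int) + 1) * (vals.count ((j : Int) + 1) : Int))
          (types + (vals.count ((j : Int) + 1) : Int)) (by omega)
          (by simp [List.length_append, List.length_replicate] at hn ⊢; omega)
        rw [add_right_comm types 1]
        exact this
    · rw [if_neg hc]
      have hc0 : vals.count ((j : Int) + 1) = 0 := by omega
      rw [hc0] at hn ⊢
      simp only [List.replicate_zero, List.nil_append] at hn ⊢
      exact ih (by omega) s types hs hn

-- ===== VERDICT (by name: the statement is the Claim_ definition above) =====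
theorem solution_spec : Claim_equal_solution := by
  unfold Claim_equal_solution
  intro k tangerine _ hpre
  obtain ⟨hne, hk⟩ := hpre
  unfold Spec_solution solution solution_alt
  rw [← PySem.Dict.counter_eq_foldl]
  have hvne := counter_values_ne_nil tangerine hne
  obtain ⟨m, hm⟩ : ∃ m, PySem.List.max? (PySem.Dict.values (PySem.Dict.counter tangerine))
      (fun v => v) = some m := by
    cases h : PySem.List.max? (PySem.Dict.values (PySem.Dict.counter tangerine)) (fun v => v) with
    | none => exact absurd ((PySem.List.max?_eq_none_iff _ _).mp h) hvne
    | some m => exact ⟨m, rfl⟩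
  simp only [hm]
  set vals := PySem.Dict.values (PySem.Dict.counter tangerine) with hvals
  have hm1 : 1 ≤ m := counter_values_pos tangerine m (PySem.List.max?_mem hm)
  have hmax : ∀ v ∈ vals, v ≤ m := PySem.List.max?_isMax hm
  have hv : ∀ v ∈ vals, 1 ≤ v ∧ v ≤ ((m.toNat : Nat) : Int) := by
    intro v hvm
    have := counter_values_pos tangerine v hvm
    have := hmax v hvm
    omega
  have hblen : ((List.replicate (m + 1).toNat (0 : Int))).length = (m + 1).toNat := List.length_replicate
  have hlen : (vals.foldl (fun bs f => bs.set f.toNat (bs.getD f.toNat 0 + 1))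
      (List.replicate (m + 1).toNat (0 : Int))).length = (m + 1).toNat := by
    rw [bucket_fold_length, hblen]
  have hb : ∀ f : Int, 1 ≤ f →
      f.toNat < (vals.foldl (fun bs f => bs.set f.toNat (bs.getD f.toNat 0 + 1))
        (List.replicate (m + 1).toNat (0 : Int))).length →
      (vals.foldl (fun bs f => bs.set f.toNat (bs.getD f.toNat 0 + 1))
        (List.replicate (m + 1).toNat (0 : Int))).getD f.toNat 0 = (vals.count f : Int) := by
    intro f hf hflen
    rw [bucket_fold_getD vals _ f (by omega) (fun v hvm => by
      have := hv v hvm; constructor <;> [omega; (rw [hblen]; omega)])]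
    rw [List.getD_replicate _ (by rw [hlen] at hflen; omega)]
    ring
  have hperm := blocks_perm vals m.toNat hv
  have hnlen : (0 : Int) + ((blocks vals m.toNat).length : Int)
      = PySem.List.len (PySem.List.sorted vals (fun v => v) true) := by
    rw [PySem.List.len_eq, PySem.List.length_sorted, hperm.length_eq]
    omega
  have hmain := loop_main k vals _ _ hb m.toNat (by omega) 0 0 (by omega) hnlen
  rw [show ((m.toNat : Nat) : Int) = m by omega] at hmain
  rw [hmain]
  rw [sorted_eq_blocks vals m.toNat hv]
  norm_num
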